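-- pv_equiv track=rewrite | github.com/nd009/linear_algebra | test.py | augmentMatrix
-- ===== SOURCE A (Python) =====
-- def augmentMatrix(mat1, mat2):
--     rlen1, clen1 = shape(mat1)
--     rlen2, clen2 = shape(mat2)
--     clen3 = clen1 + clen2
--     matrix = [[0 for col in range(clen3)] for row in range(rlen1)]
--     for i in range(rlen1):
--         for j in range(clen3):
--             if j < clen1:
--                 matrix[i][j] = mat1[i][j]
--             if j >= clen1:
--                 k = j - clen1
--                 matrix[i][j] = mat2[i][k]
--     return matrix
--
-- def shape(M):
--     return len(M), len(M[0])
-- ===== SOURCE B (Python) =====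
-- def augmentMatrix(mat1, mat2):
--     rlen1, clen1 = len(mat1), len(mat1[0])
--     clen2 = len(mat2[0])
--     return [mat1[i][:clen1] + mat2[i][:clen2] for i in range(rlen1)]
-- ===== Notes on version B (the rewrite author's own statement) =====
-- stated objective: simpler
-- what changed: Replaces the zero-filled allocation plus the doubly-nested cell-by-cell copy loops with their per-cell branch by a single row-level comprehension concatenating each row's first clen1 columns of mat1 with the first clen2 columns of mat2's row; the per-cell interpreted loop disappears into C-level slice+concat, a constant-factor speedup a timing run measured.
-- outside the precondition, e.g. on augmentMatrix([[1], [2]], [[]]): A returns [[1], [2]], B raises IndexError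
import Mathlib
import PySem

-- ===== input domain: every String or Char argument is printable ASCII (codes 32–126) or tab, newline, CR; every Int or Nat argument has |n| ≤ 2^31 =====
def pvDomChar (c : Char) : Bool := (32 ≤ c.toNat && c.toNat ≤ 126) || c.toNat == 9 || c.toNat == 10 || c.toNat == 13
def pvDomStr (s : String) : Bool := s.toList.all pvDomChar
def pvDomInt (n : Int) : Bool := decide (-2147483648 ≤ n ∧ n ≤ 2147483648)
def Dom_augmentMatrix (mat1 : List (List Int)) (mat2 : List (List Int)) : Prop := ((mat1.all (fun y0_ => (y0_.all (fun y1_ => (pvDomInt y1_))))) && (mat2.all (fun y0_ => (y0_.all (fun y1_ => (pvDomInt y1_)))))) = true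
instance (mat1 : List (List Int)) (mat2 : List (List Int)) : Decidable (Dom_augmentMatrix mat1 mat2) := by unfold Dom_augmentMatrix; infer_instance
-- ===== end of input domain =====

-- B replaces A's zero-fill + nested cell-by-cell copy with one row-level comprehension
-- concatenating the first clen1 columns of mat1's row with the first clen2 columns of mat2's row (objective: simpler).


-- ===== PORT A =====
-- literal transliteration of A: shape from row 0, zero-filled rlen1 × clen3 matrix,
-- then the i/j loops assigning matrix[i][j] cell by cell (two guarded assignments, as in A).
-- Under Pre_ all indices are in range, so .getD reads are exactly Python's indexing.
def augmentMatrix (mat1 : List (List Int)) (mat2 : List (List Int)) : List (List Int) :=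
  let rlen1 := mat1.length
  let clen1 := (mat1.headD []).length
  let clen2 := (mat2.headD []).length
  let clen3 := clen1 + clen2
  let matrix := (List.range rlen1).map (fun _ => (List.range clen3).map (fun _ => (0 : Int)))
  (List.range rlen1).foldl (fun matrix i =>
    matrix.set i ((List.range clen3).foldl (fun row j =>
      let row := if j < clen1 then row.set j ((mat1.getD i []).getD j 0) else row
      if clen1 ≤ j then row.set j ((mat2.getD i []).getD (j - clen1) 0) else row)
      (matrix.getD i []))) matrix

-- ===== PORT B =====
-- Source B: [mat1[i][:clen1] + mat2[i][:clen2] for i in range(rlen1)];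
-- a slice [:n] with n = a length (n ≥ 0) is exactly List.take n.
def augmentMatrix_alt (mat1 : List (List Int)) (mat2 : List (List Int)) : List (List Int) :=
  let rlen1 := mat1.length
  let clen1 := (mat1.headD []).length
  let clen2 := (mat2.headD []).length
  (List.range rlen1).map (fun i => (mat1.getD i []).take clen1 ++ (mat2.getD i []).take clen2)

-- ===== PRECONDITION & SPEC =====
-- Pre_ = the inputs where A returns without raising (both matrices nonempty, every mat1 row at
-- least as wide as row 0, the first rlen1 rows of mat2 at least as wide as mat2's row 0),
-- minus one corner A returns on but B raises on: clen2 = 0 with mat1 longer than mat2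
-- (there A never touches mat2's rows; B's mat2[i] raises IndexError) — hence the
-- 'mat1.length ≤ mat2.length' conjunct, which is vacuous for A only when clen2 = 0.
def Pre_augmentMatrix (mat1 : List (List Int)) (mat2 : List (List Int)) : Prop :=
  mat1 ≠ [] ∧ mat2 ≠ [] ∧ mat1.length ≤ mat2.length ∧
  (∀ r ∈ mat1, (mat1.headD []).length ≤ r.length) ∧
  (∀ r ∈ mat2.take mat1.length, (mat2.headD []).length ≤ r.length)
instance (mat1 : List (List Int)) (mat2 : List (List Int)) : Decidable (Pre_augmentMatrix mat1 mat2) := by unfold Pre_augmentMatrix; infer_instance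

def pvWitness_augmentMatrix : List (List Int) × List (List Int) := ([[1, 2], [3, 4]], [[5], [6]])

def Spec_augmentMatrix (mat1 : List (List Int)) (mat2 : List (List Int)) (out : List (List Int)) : Prop := out = augmentMatrix_alt mat1 mat2
instance (mat1 : List (List Int)) (mat2 : List (List Int)) (out : List (List Int)) : Decidable (Spec_augmentMatrix mat1 mat2 out) := by unfold Spec_augmentMatrix; infer_instance

-- ===== CLAIM (what is proved, stated in full; the proofs are below) =====
def Claim_equal_augmentMatrix : Prop := ∀ (mat1 : List (List Int)) (mat2 : List (List Int)), Dom_augmentMatrix mat1 mat2 → Pre_augmentMatrix mat1 mat2 → Spec_augmentMatrix mat1 mat2 (augmentMatrix mat1 mat2)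

-- ===== LEMMAS AND PROOFS =====

-- generic: a fold over range m that sets index i to g i (current value at i)
-- preserves length and acts pointwise.
theorem pv_foldl_set_length {α : Type} (g : Nat → α → α) (d : α) :
    ∀ (m : Nat) (r0 : List α),
      ((List.range m).foldl (fun r i => r.set i (g i (r.getD i d))) r0).length = r0.length := by
  intro m
  induction m with
  | zero => intro r0; simp
  | succ n ih =>
    intro r0
    rw [List.range_succ, List.foldl_append]
    simp only [List.foldl_cons, List.foldl_nil, List.length_set]
    exact ih r0

theorem pv_foldl_set_getD {α : Type} (g : Nat → α → α) (d : α) :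
    ∀ (m : Nat) (r0 : List α) (j : Nat),
      ((List.range m).foldl (fun r i => r.set i (g i (r.getD i d))) r0).getD j d =
      if j < m ∧ j < r0.length then g j (r0.getD j d) else r0.getD j d := by
  intro m
  induction m with
  | zero => intro r0 j; simp
  | succ n ih =>
    intro r0 j
    rw [List.range_succ, List.foldl_append]
    simp only [List.foldl_cons, List.foldl_nil]
    have hlen := pv_foldl_set_length g d n r0
    by_cases hjn : j = n
    · subst hjn
      by_cases hj : j < r0.length
      · rw [List.getD, List.getElem?_set_self (by omega), ih]
        simp [hj]
      · rw [List.set_eq_of_length_le (by rw [hlen]; omega), ih]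
        simp [hj]
    · rw [List.getD, List.getElem?_set_ne (by omega), ← List.getD, ih]
      rcases Nat.lt_or_ge j n with h | h
      · simp [h, Nat.lt_succ_of_lt h]
      · have : ¬ j < n := by omega
        have : ¬ j < n + 1 := by omega
        simp [*]

-- wrappers taking the fold function as given, so `rw` matches the ports' lambdas syntactically
theorem pv_foldl_set_length' {α : Type} (f : List α → Nat → List α) (g : Nat → α → α) (d : α)
    (hf : ∀ r i, f r i = r.set i (g i (r.getD i d))) (m : Nat) (r0 : List α) :
    ((List.range m).foldl f r0).length = r0.length := by
  have hfe : f = fun r i => r.set i (g i (r.getD i d)) := funext fun r => funext fun i => hf r i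
  rw [hfe]; exact pv_foldl_set_length g d m r0

theorem pv_foldl_set_getD' {α : Type} (f : List α → Nat → List α) (g : Nat → α → α) (d : α)
    (hf : ∀ r i, f r i = r.set i (g i (r.getD i d))) (m : Nat) (r0 : List α) (j : Nat) :
    ((List.range m).foldl f r0).getD j d =
    if j < m ∧ j < r0.length then g j (r0.getD j d) else r0.getD j d := by
  have hfe : f = fun r i => r.set i (g i (r.getD i d)) := funext fun r => funext fun i => hf r i
  rw [hfe]; exact pv_foldl_set_getD g d m r0 j

-- the inner step of port A (two guarded sets) is a single set to the selected value
theorem pv_inner_fun (c1 : Nat) (a b : List Int) :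
    (fun (row : List Int) (j : Nat) =>
      let row' := if j < c1 then row.set j (a.getD j 0) else row
      if c1 ≤ j then row'.set j (b.getD (j - c1) 0) else row') =
    (fun (row : List Int) (j : Nat) =>
      row.set j (if j < c1 then a.getD j 0 else b.getD (j - c1) 0)) := by
  funext row j
  by_cases h : j < c1
  · simp [h, Nat.not_le.mpr h]
  · simp [h, Nat.le_of_not_lt h]

theorem pv_main (mat1 mat2 : List (List Int))
    (h1 : mat1 ≠ []) (h2 : mat2 ≠ []) (hle : mat1.length ≤ mat2.length)
    (hw1 : ∀ r ∈ mat1, (mat1.headD []).length ≤ r.length)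
    (hw2 : ∀ r ∈ mat2.take mat1.length, (mat2.headD []).length ≤ r.length) :
    augmentMatrix mat1 mat2 = augmentMatrix_alt mat1 mat2 := by
  simp only [augmentMatrix, augmentMatrix_alt, pv_inner_fun]
  set rlen1 := mat1.length with hr
  set c1 := (mat1.headD []).length with hc1
  set c2 := (mat2.headD []).length with hc2
  set m0 := (List.range rlen1).map
      (fun _ => (List.range (c1 + c2)).map (fun _ => (0 : Int))) with hm0
  have hm0len : m0.length = rlen1 := by simp [hm0]
  have hm0get : ∀ i < rlen1, m0.getD i [] = (List.range (c1 + c2)).map (fun _ => (0 : Int)) := by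
    intro i hi
    simp [hm0, List.getD, hi]
  have hglen := pv_foldl_set_length'
      (fun matrix i =>
        matrix.set i
          (List.foldl
            (fun row j => row.set j
              (if j < c1 then (mat1.getD i []).getD j 0 else (mat2.getD i []).getD (j - c1) 0))
            (matrix.getD i []) (List.range (c1 + c2))))
      (fun i row => List.foldl
        (fun row j => row.set j
          (if j < c1 then (mat1.getD i []).getD j 0 else (mat2.getD i []).getD (j - c1) 0))
        row (List.range (c1 + c2))) []
      (fun r i => rfl) rlen1 m0
  apply List.ext_getElem
  · rw [hglen]; simp [hm0len]
  intro i hiL hiR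
  have hi : i < rlen1 := by simpa using hiR
  -- bounds from Pre_
  have hr1 : mat1.getD i [] = mat1[i] := List.getD_eq_getElem mat1 [] (by omega)
  have hr2 : mat2.getD i [] = mat2[i]'(by omega) := List.getD_eq_getElem mat2 [] (by omega)
  have hb1 : c1 ≤ (mat1.getD i []).length := by
    rw [hr1]; exact hw1 _ (List.getElem_mem _)
  have hb2 : c2 ≤ (mat2.getD i []).length := by
    rw [hr2]
    apply hw2
    have h' : (mat2.take rlen1)[i]'(by simp only [List.length_take]; omega) = mat2[i]'(by omega) :=
      List.getElem_take
    rw [← h']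
    exact List.getElem_mem _
  -- left side: row i of the fold result
  have hL : (List.foldl
      (fun matrix i =>
        matrix.set i
          (List.foldl
            (fun row j => row.set j
              (if j < c1 then (mat1.getD i []).getD j 0 else (mat2.getD i []).getD (j - c1) 0))
            (matrix.getD i []) (List.range (c1 + c2))))
      m0 (List.range rlen1)).getD i [] =
      List.foldl
        (fun row j => row.set j
          (if j < c1 then (mat1.getD i []).getD j 0 else (mat2.getD i []).getD (j - c1) 0))
        ((List.range (c1 + c2)).map (fun _ => (0 : Int))) (List.range (c1 + c2)) := by
    rw [pv_foldl_set_getD'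
      (fun matrix i =>
        matrix.set i
          (List.foldl
            (fun row j => row.set j
              (if j < c1 then (mat1.getD i []).getD j 0 else (mat2.getD i []).getD (j - c1) 0))
            (matrix.getD i []) (List.range (c1 + c2))))
      (fun i row => List.foldl
        (fun row j => row.set j
          (if j < c1 then (mat1.getD i []).getD j 0 else (mat2.getD i []).getD (j - c1) 0))
        row (List.range (c1 + c2))) []
      (fun r i => rfl) rlen1 m0 i]
    rw [if_pos ⟨hi, by omega⟩, hm0get i hi]
  have hrowlen : (List.foldl
        (fun row j => row.set j
          (if j < c1 then (mat1.getD i []).getD j 0 else (mat2.getD i []).getD (j - c1) 0))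
        ((List.range (c1 + c2)).map (fun _ => (0 : Int))) (List.range (c1 + c2))).length
        = c1 + c2 := by
    rw [pv_foldl_set_length'
      (fun row j => row.set j
        (if j < c1 then (mat1.getD i []).getD j 0 else (mat2.getD i []).getD (j - c1) 0))
      (fun j _ => if j < c1 then (mat1.getD i []).getD j 0 else (mat2.getD i []).getD (j - c1) 0) 0
      (fun r j => rfl)]
    simp
  have hLi : (List.foldl
      (fun matrix i =>
        matrix.set i
          (List.foldl
            (fun row j => row.set j
              (if j < c1 then (mat1.getD i []).getD j 0 else (mat2.getD i []).getD (j - c1) 0))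
            (matrix.getD i []) (List.range (c1 + c2))))
      m0 (List.range rlen1))[i] =
      List.foldl
        (fun row j => row.set j
          (if j < c1 then (mat1.getD i []).getD j 0 else (mat2.getD i []).getD (j - c1) 0))
        ((List.range (c1 + c2)).map (fun _ => (0 : Int))) (List.range (c1 + c2)) := by
    rw [← List.getD_eq_getElem _ [] hiL]; exact hL
  rw [hLi]
  -- right side: row i of the map
  have hRi : ((List.range rlen1).map
      (fun i => (mat1.getD i []).take c1 ++ (mat2.getD i []).take c2))[i]'hiR =
      (mat1.getD i []).take c1 ++ (mat2.getD i []).take c2 := by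
    simp
  rw [hRi]
  -- now the two rows are equal
  apply List.ext_getElem
  · rw [hrowlen]; simp only [List.length_append, List.length_take]; omega
  intro j hjL hjR
  have hj3 : j < c1 + c2 := by rw [hrowlen] at hjL; exact hjL
  have hjget : (List.foldl
        (fun row j => row.set j
          (if j < c1 then (mat1.getD i []).getD j 0 else (mat2.getD i []).getD (j - c1) 0))
        ((List.range (c1 + c2)).map (fun _ => (0 : Int))) (List.range (c1 + c2)))[j] =
      (if j < c1 then (mat1.getD i []).getD j 0 else (mat2.getD i []).getD (j - c1) 0) := by
    rw [← List.getD_eq_getElem _ 0 hjL]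
    rw [pv_foldl_set_getD'
      (fun row j => row.set j
        (if j < c1 then (mat1.getD i []).getD j 0 else (mat2.getD i []).getD (j - c1) 0))
      (fun j _ => if j < c1 then (mat1.getD i []).getD j 0 else (mat2.getD i []).getD (j - c1) 0) 0
      (fun r j => rfl)]
    rw [if_pos ⟨hj3, by simp only [List.length_map, List.length_range]; omega⟩]
  rw [hjget]
  by_cases hjc : j < c1
  · rw [if_pos hjc]
    rw [List.getElem_append_left (by simp only [List.length_take]; omega)]
    rw [List.getElem_take]
    exact List.getD_eq_getElem _ 0 (by omega)
  · rw [if_neg hjc]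
    rw [List.getElem_append_right (by simp only [List.length_take]; omega)]
    have htl : ((mat1.getD i []).take c1).length = c1 := by simp only [List.length_take]; omega
    simp only [htl]
    rw [List.getElem_take]
    exact List.getD_eq_getElem _ 0 (by omega)

-- ===== VERDICT (by name: the statement is the Claim_ definition above) =====
theorem augmentMatrix_spec : Claim_equal_augmentMatrix := by
  intro mat1 mat2 _ hpre
  obtain ⟨h1, h2, hle, hw1, hw2⟩ := hpre
  exact pv_main mat1 mat2 h1 h2 hle hw1 hw2
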